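-- pv_equiv track=rewrite | github.com/sgt1796/POP | content_splitter.py | get_sorted_title_positions
-- ===== SOURCE A (Python) =====
-- def get_sorted_title_positions(full_text: str, titles: list) -> list:
--     """
--     Find the positions of each title in the full text and return a sorted list of (position, title) tuples.
--     """
--     title_positions = []
--     for title in titles:
--         pos = full_text.find(title)
--         if pos != -1:
--             title_positions.append((pos, title))
--     title_positions.sort(key=lambda x: x[0])
--
--     # Deduplicate titles that are very close together.
--     deduped = []
--     last_pos = -100
--     for pos, title in title_positions:
--         if pos - last_pos > 10:
--             deduped.append((pos, title))
--             last_pos = pos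
--     return deduped
-- ===== SOURCE B (Python) =====
-- def get_sorted_title_positions(full_text: str, titles: list) -> list:
--     """
--     Find the positions of each title in the full text and return a sorted list of (position, title) tuples.
--     """
--     found = [(full_text.find(t), t) for t in titles]
--     candidates = [pt for pt in found if pt[0] != -1]
--     # Selection loop: emit the earliest candidate (first one on ties),
--     # drop everything within 10 characters of it, repeat.  No sorting needed.
--     out = []
--     while candidates:
--         pos, title = min(candidates, key=lambda x: x[0])
--         out.append((pos, title))
--         candidates = [pt for pt in candidates if pt[0] > pos + 10]
--     return out
-- ===== Notes on version B (the rewrite author's own statement) =====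
-- stated objective: alternative
-- what changed: Replaces A's stable sort + last_pos gap-dedup scan with a selection loop that repeatedly takes the earliest remaining candidate (Python min, first on ties) and filters out all candidates within 10 characters of it, so no sort and no dedup scan are needed.
import Mathlib
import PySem

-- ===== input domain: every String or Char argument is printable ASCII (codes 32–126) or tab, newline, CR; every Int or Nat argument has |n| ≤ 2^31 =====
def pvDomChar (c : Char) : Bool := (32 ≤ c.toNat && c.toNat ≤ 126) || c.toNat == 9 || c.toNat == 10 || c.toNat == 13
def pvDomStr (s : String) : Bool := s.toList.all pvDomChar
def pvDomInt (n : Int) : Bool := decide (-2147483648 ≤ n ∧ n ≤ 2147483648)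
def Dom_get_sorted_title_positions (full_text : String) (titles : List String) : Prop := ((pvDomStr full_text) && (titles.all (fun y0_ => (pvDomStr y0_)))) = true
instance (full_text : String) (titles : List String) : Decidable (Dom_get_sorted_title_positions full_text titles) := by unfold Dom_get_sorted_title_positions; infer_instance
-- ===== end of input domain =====

-- B replaces A's stable sort + gap-dedup scan by a selection recursion (repeatedly take the
-- earliest remaining candidate and filter away candidates within 10 characters); same return value.

-- ===== PORT A =====
def get_sorted_title_positions (full_text : String) (titles : List String) : List (Int × String) :=
  -- title_positions = []; for title in titles: pos = full_text.find(title); if pos != -1: append (pos, title)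
  let title_positions : List (Int × String) :=
    titles.foldl (fun acc title =>
      if PySem.Str.find full_text title ≠ -1 then acc ++ [(PySem.Str.find full_text title, title)]
      else acc) []
  -- title_positions.sort(key=lambda x: x[0])  (stable)
  let sortedList := PySem.List.sorted title_positions (fun x => x.1) false
  -- deduped = []; last_pos = -100; for pos, title in sorted: if pos - last_pos > 10: append, last_pos = pos
  let r := sortedList.foldl
    (fun (st : List (Int × String) × Int) pt =>
      if pt.1 - st.2 > 10 then (st.1 ++ [pt], pt.1) else st) ([], -100)
  r.1

-- ===== PORT B =====
-- termination helper for the selection recursion (the port cites it in decreasing_by)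
theorem pvFilter_length_lt {α : Type} {p : α → Bool} {l : List α} {a : α}
    (ha : a ∈ l) (hp : p a = false) : (l.filter p).length < l.length := by
  induction l with
  | nil => cases ha
  | cons b t ih =>
    rcases List.mem_cons.mp ha with h | h
    · subst h
      rw [List.filter_cons_of_neg (by simp [hp])]
      exact Nat.lt_succ_of_le (List.length_filter_le _ _)
    · by_cases hb : p b
      · rw [List.filter_cons_of_pos hb]
        simpa using ih h
      · rw [List.filter_cons_of_neg (by simpa using hb)]
        exact Nat.lt_succ_of_le (Nat.le_of_lt (ih h))

theorem pvSelect_dec {cand : List (Int × String)} {m : Int × String}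
    (hmin : PySem.List.min? cand (fun x => x.1) = some m) :
    (cand.filter (fun pt => decide (pt.1 > m.1 + 10))).length < cand.length := by
  refine pvFilter_length_lt (PySem.List.min?_mem hmin) ?_
  simp only [decide_eq_false_iff_not]
  omega

-- the while loop of Source B: out accumulates; candidates shrinks each round
def pvSelectLoop (candidates : List (Int × String)) (out : List (Int × String)) :
    List (Int × String) :=
  -- while candidates: pos, title = min(candidates, key=lambda x: x[0]); out.append(...); filter
  -- (Python's min on a non-empty list = PySem.List.min?; the emptiness test is the none case)
  match hm : PySem.List.min? candidates (fun x => x.1) with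
  | none => out
  | some best =>
      pvSelectLoop (candidates.filter (fun pt => decide (pt.1 > best.1 + 10))) (out ++ [best])
termination_by candidates.length
decreasing_by
  simp only [List.length_unattach]
  rw [← List.countP_eq_length_filter,
    List.countP_attach (p := fun pt : Int × String => decide (pt.1 > best.1 + 10)),
    List.countP_eq_length_filter]
  exact pvSelect_dec hm

def get_sorted_title_positions_alt (full_text : String) (titles : List String) : List (Int × String) :=
  let found := titles.map (fun t => (PySem.Str.find full_text t, t))
  let candidates := found.filter (fun pt => decide (pt.1 ≠ -1))
  pvSelectLoop candidates []

-- ===== PRECONDITION & SPEC =====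
def Spec_get_sorted_title_positions (full_text : String) (titles : List String) (out : List (Int × String)) : Prop := out = get_sorted_title_positions_alt full_text titles
instance (full_text : String) (titles : List String) (out : List (Int × String)) : Decidable (Spec_get_sorted_title_positions full_text titles out) := by unfold Spec_get_sorted_title_positions; infer_instance

-- ===== CLAIM (what is proved, stated in full; the proofs are below) =====
def Claim_equal_get_sorted_title_positions : Prop := ∀ (full_text : String) (titles : List String), Dom_get_sorted_title_positions full_text titles → Spec_get_sorted_title_positions full_text titles (get_sorted_title_positions full_text titles)

-- ===== LEMMAS AND PROOFS =====

-- cons-style form of the selection loop, easier to induct on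
def pvSelect (candidates : List (Int × String)) : List (Int × String) :=
  match hm : PySem.List.min? candidates (fun x => x.1) with
  | none => []
  | some best =>
      best :: pvSelect (candidates.filter (fun pt => decide (pt.1 > best.1 + 10)))
termination_by candidates.length
decreasing_by
  simp only [List.length_unattach]
  rw [← List.countP_eq_length_filter,
    List.countP_attach (p := fun pt : Int × String => decide (pt.1 > best.1 + 10)),
    List.countP_eq_length_filter]
  exact pvSelect_dec hm

theorem pvSelectLoop_eq_select (candidates : List (Int × String)) :
    ∀ out, pvSelectLoop candidates out = out ++ pvSelect candidates := by
  induction hn : candidates.length using Nat.strong_induction_on generalizing candidates with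
  | _ n ih =>
    intro out
    rw [pvSelectLoop, pvSelect]
    rcases hm : PySem.List.min? candidates (fun x => x.1) with _ | best
    · simp
    · simp only
      subst hn
      rw [ih _ (pvSelect_dec hm) _ rfl]
      simp

-- A's dedup loop, written as structural recursion on the (sorted) list
def pvDedupGo : List (Int × String) → Int → List (Int × String)
  | [], _ => []
  | pt :: rest, l => if pt.1 - l > 10 then pt :: pvDedupGo rest pt.1 else pvDedupGo rest l

theorem pvDedup_foldl_eq (ys : List (Int × String)) :
    ∀ (acc : List (Int × String)) (l : Int),
      (ys.foldl (fun (st : List (Int × String) × Int) pt =>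
        if pt.1 - st.2 > 10 then (st.1 ++ [pt], pt.1) else st) (acc, l)).1
      = acc ++ pvDedupGo ys l := by
  induction ys with
  | nil => intro acc l; simp [pvDedupGo]
  | cons pt rest ih =>
    intro acc l
    by_cases h : pt.1 - l > 10
    · simp [List.foldl_cons, h, pvDedupGo, ih]
    · simp [List.foldl_cons, h, pvDedupGo, ih]

-- min? of a list whose head is a minimum is the head
theorem pvMin?_cons_of_le {t : List (Int × String)} {x : Int × String}
    (h : ∀ y ∈ t, x.1 ≤ y.1) :
    PySem.List.min? (x :: t) (fun p => p.1) = some x := by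
  simp only [PySem.List.min?, List.foldl_cons]
  induction t with
  | nil => rfl
  | cons a s ih =>
    have hax : ¬ ((fun p : Int × String => p.1) a < (fun p : Int × String => p.1) x) :=
      not_lt.mpr (h a (List.mem_cons_self))
    simp only [List.foldl_cons, hax, if_false]
    exact ih (fun y hy => h y (List.mem_cons_of_mem _ hy))

theorem pvMin?_append_singleton_some {xs : List (Int × String)} {m : Int × String}
    (x : Int × String) (hm : PySem.List.min? xs (fun p => p.1) = some m) :
    PySem.List.min? (xs ++ [x]) (fun p => p.1)
      = if x.1 < m.1 then some x else some m := by
  simp only [PySem.List.min?] at hm ⊢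
  rw [List.foldl_append, hm, List.foldl_cons, List.foldl_nil]

theorem pvSorted_append_singleton (xs : List (Int × String)) (x : Int × String) :
    PySem.List.sorted (xs ++ [x]) (fun p => p.1) false
      = PySem.List.insertBy (fun a b => decide (a.1 < b.1)) x
          (PySem.List.sorted xs (fun p => p.1) false) := by
  rw [PySem.List.sorted_eq_foldl_insertBy, PySem.List.sorted_eq_foldl_insertBy, List.foldl_append]
  rfl

theorem pvInsertBy_cons_of_lt {zs : List (Int × String)} {x : Int × String}
    (h : ∀ z ∈ zs, x.1 < z.1) :
    PySem.List.insertBy (fun a b => decide (a.1 < b.1)) x zs = x :: zs := by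
  cases zs with
  | nil => rfl
  | cons z t =>
    have := h z List.mem_cons_self
    simp [PySem.List.insertBy, this]

-- head of the stable sort = Python's min (first minimal element)
theorem pvMin?_sorted (xs : List (Int × String)) :
    PySem.List.min? (PySem.List.sorted xs (fun p => p.1) false) (fun p => p.1)
      = PySem.List.min? xs (fun p => p.1) := by
  induction xs using List.reverseRecOn with
  | nil => rfl
  | append_singleton xs x ih =>
    rw [pvSorted_append_singleton]
    cases hm : PySem.List.min? xs (fun p => p.1) with
    | none =>
      have hxs : xs = [] := (PySem.List.min?_eq_none_iff xs _).mp hm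
      subst hxs
      rfl
    | some m =>
      rw [pvMin?_append_singleton_some x hm]
      -- sorted xs is nonempty with head m
      have hne : PySem.List.sorted xs (fun p => p.1) false ≠ [] := by
        intro hnil
        have : xs = [] := (PySem.List.sorted_eq_nil_iff xs _ _).mp hnil
        subst this; simp [PySem.List.min?, List.foldl] at hm
      obtain ⟨h, t, hht⟩ := List.exists_cons_of_ne_nil hne
      have hpw : (PySem.List.sorted xs (fun p => p.1) false).Pairwise (fun a b => a.1 ≤ b.1) :=
        PySem.List.sorted_pairwise xs _
      rw [hht] at hpw
      have hhle : ∀ y ∈ t, h.1 ≤ y.1 := (List.pairwise_cons.mp hpw).1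
      have hhm' : h = m := by
        have h1 : PySem.List.min? (PySem.List.sorted xs (fun p => p.1) false) (fun p => p.1)
            = some h := by rw [hht]; exact pvMin?_cons_of_le hhle
        have h2 : (some h : Option (Int × String)) = some m := h1.symm.trans (ih.trans hm)
        injection h2
      by_cases hlt : x.1 < m.1
      · rw [hht]
        have : PySem.List.insertBy (fun a b => decide (a.1 < b.1)) x (h :: t) = x :: h :: t := by
          apply pvInsertBy_cons_of_lt
          intro z hz
          rcases List.mem_cons.mp hz with rfl | hz
          · exact hhm' ▸ hlt
          · exact lt_of_lt_of_le (hhm' ▸ hlt) (hhm' ▸ (hhm' ▸ hhle z hz))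
        rw [this, pvMin?_cons_of_le, if_pos hlt]
        intro y hy
        rcases List.mem_cons.mp hy with rfl | hy
        · exact le_of_lt (hhm' ▸ hlt)
        · exact le_trans (le_of_lt (hhm' ▸ hlt)) (hhle y hy)
      · rw [hht]
        have hins : PySem.List.insertBy (fun a b => decide (a.1 < b.1)) x (h :: t)
            = h :: PySem.List.insertBy (fun a b => decide (a.1 < b.1)) x t := by
          have : ¬ (x.1 < h.1) := hhm' ▸ hlt
          simp [PySem.List.insertBy, this]
        rw [hins, pvMin?_cons_of_le, if_neg hlt, hhm']
        intro y hy
        rcases (PySem.List.mem_insertBy _ _ _ _).mp hy with rfl | hy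
        · exact hhm' ▸ (not_lt.mp hlt)
        · exact hhle y hy

-- stable sort commutes with filter: insertBy step, on a key-sorted list
theorem pvFilter_insertBy (p : Int × String → Bool) (x : Int × String) :
    ∀ (ys : List (Int × String)), ys.Pairwise (fun a b => a.1 ≤ b.1) →
      (PySem.List.insertBy (fun a b => decide (a.1 < b.1)) x ys).filter p
        = if p x then PySem.List.insertBy (fun a b => decide (a.1 < b.1)) x (ys.filter p)
          else ys.filter p := by
  intro ys
  induction ys with
  | nil =>
    intro _
    by_cases hpx : p x <;> simp [PySem.List.insertBy, List.filter, hpx]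
  | cons y t ih =>
    intro hpw
    have hyt : ∀ z ∈ t, y.1 ≤ z.1 := (List.pairwise_cons.mp hpw).1
    have htpw : t.Pairwise (fun a b => a.1 ≤ b.1) := (List.pairwise_cons.mp hpw).2
    by_cases hxy : x.1 < y.1
    · have hstep : PySem.List.insertBy (fun a b => decide (a.1 < b.1)) x (y :: t)
          = x :: y :: t := by simp [PySem.List.insertBy, hxy]
      rw [hstep]
      by_cases hpx : p x
      · have hall : ∀ z ∈ (y :: t).filter p, x.1 < z.1 := by
          intro z hz
          have hz' := List.mem_of_mem_filter hz
          rcases List.mem_cons.mp hz' with rfl | hz'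
          · exact hxy
          · exact lt_of_lt_of_le hxy (hyt z hz')
        rw [if_pos hpx, pvInsertBy_cons_of_lt hall]
        simp [List.filter, hpx]
      · rw [if_neg (by simp [hpx])]
        simp [List.filter, hpx]
    · have hstep : PySem.List.insertBy (fun a b => decide (a.1 < b.1)) x (y :: t)
          = y :: PySem.List.insertBy (fun a b => decide (a.1 < b.1)) x t := by
        simp [PySem.List.insertBy, hxy]
      rw [hstep]
      by_cases hpy : p y
      · by_cases hpx : p x
        · have hins2 : PySem.List.insertBy (fun a b => decide (a.1 < b.1)) x (y :: t.filter p)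
              = y :: PySem.List.insertBy (fun a b => decide (a.1 < b.1)) x (t.filter p) := by
            simp [PySem.List.insertBy, hxy]
          rw [if_pos hpx, List.filter_cons_of_pos hpy, List.filter_cons_of_pos hpy, hins2,
            ih htpw, if_pos hpx]
        · rw [if_neg (by simp [hpx]), List.filter_cons_of_pos hpy, List.filter_cons_of_pos hpy,
            ih htpw, if_neg (by simp [hpx])]
      · by_cases hpx : p x
        · rw [if_pos hpx, List.filter_cons_of_neg hpy, List.filter_cons_of_neg hpy,
            ih htpw, if_pos hpx]
        · rw [if_neg (by simp [hpx]), List.filter_cons_of_neg hpy, List.filter_cons_of_neg hpy,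
            ih htpw, if_neg (by simp [hpx])]

theorem pvFilter_sorted (p : Int × String → Bool) (xs : List (Int × String)) :
    (PySem.List.sorted xs (fun q => q.1) false).filter p
      = PySem.List.sorted (xs.filter p) (fun q => q.1) false := by
  induction xs using List.reverseRecOn with
  | nil => rfl
  | append_singleton xs x ih =>
    rw [pvSorted_append_singleton,
      pvFilter_insertBy p x _ (PySem.List.sorted_pairwise xs _), ih, List.filter_append]
    by_cases hpx : p x
    · rw [if_pos hpx]
      simp only [List.filter, hpx]
      rw [pvSorted_append_singleton]
    · rw [if_neg hpx]
      simp [List.filter, hpx]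

-- unfolding equation for pvSelect
theorem pvSelect_eq (candidates : List (Int × String)) :
    pvSelect candidates
      = match PySem.List.min? candidates (fun x => x.1) with
        | none => []
        | some best =>
            best :: pvSelect (candidates.filter (fun pt => decide (pt.1 > best.1 + 10))) := by
  rw [pvSelect]
  rcases h : PySem.List.min? candidates (fun x => x.1) with _ | best <;> simp

-- A's dedup scan over a key-sorted list = selection recursion over its filtered tail
theorem pvDedupGo_eq_select :
    ∀ (ys : List (Int × String)), ys.Pairwise (fun a b => a.1 ≤ b.1) →
      ∀ (l : Int), pvDedupGo ys l = pvSelect (ys.filter (fun pt => decide (pt.1 > l + 10))) := by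
  intro ys
  induction ys with
  | nil =>
    intro _ l
    rw [pvSelect_eq]
    rfl
  | cons pt rest ih =>
    intro hpw l
    have hle : ∀ z ∈ rest, pt.1 ≤ z.1 := (List.pairwise_cons.mp hpw).1
    have hrest : rest.Pairwise (fun a b => a.1 ≤ b.1) := (List.pairwise_cons.mp hpw).2
    by_cases h : pt.1 - l > 10
    · have hkeep : (pt.1 > l + 10) := by omega
      rw [List.filter_cons_of_pos (by simp [hkeep])]
      rw [pvSelect_eq]
      have hmin : PySem.List.min? (pt :: rest.filter (fun q => decide (q.1 > l + 10)))
          (fun x => x.1) = some pt := by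
        apply pvMin?_cons_of_le
        intro y hy
        exact hle y (List.mem_of_mem_filter hy)
      rw [hmin]
      simp only
      have hself : ¬ (pt.1 > pt.1 + 10) := by omega
      rw [List.filter_cons_of_neg (by simp [hself])]
      have hff : (rest.filter (fun q => decide (q.1 > l + 10))).filter
            (fun q => decide (q.1 > pt.1 + 10))
          = rest.filter (fun q => decide (q.1 > pt.1 + 10)) := by
        rw [List.filter_filter]
        apply List.filter_congr
        intro z _
        by_cases hz : z.1 > pt.1 + 10
        · have : z.1 > l + 10 := by omega
          simp [hz, this]
        · simp [hz]
      rw [hff]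
      simp only [pvDedupGo, if_pos h]
      rw [ih hrest pt.1]
    · have hdrop : ¬ (pt.1 > l + 10) := by omega
      rw [List.filter_cons_of_neg (by simp [hdrop])]
      simp only [pvDedupGo, if_neg h]
      exact ih hrest l

-- the selection recursion is invariant under stable sorting by position
theorem pvSelect_sorted (xs : List (Int × String)) :
    pvSelect (PySem.List.sorted xs (fun p => p.1) false) = pvSelect xs := by
  induction hn : xs.length using Nat.strong_induction_on generalizing xs with
  | _ n ih =>
    rw [pvSelect_eq, pvSelect_eq, pvMin?_sorted]
    cases hm : PySem.List.min? xs (fun p => p.1) with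
    | none => rfl
    | some m =>
      simp only
      congr 1
      rw [pvFilter_sorted]
      subst hn
      apply ih _ _ _ rfl
      have hmem : m ∈ xs := PySem.List.min?_mem hm
      have hfail : ¬ (m.1 > m.1 + 10) := by omega
      exact pvSelect_dec hm

-- the two candidate lists coincide
theorem pvCandidates_eq (full_text : String) (titles : List String) :
    (titles.map (fun t => (PySem.Str.find full_text t, t))).filter (fun pt => decide (pt.1 ≠ -1))
      = (titles.filter (fun t => decide (PySem.Str.find full_text t ≠ -1))).map
          (fun t => (PySem.Str.find full_text t, t)) := by
  rw [List.filter_map]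
  rfl

-- ===== VERDICT (by name: the statement is the Claim_ definition above) =====
theorem get_sorted_title_positions_spec : Claim_equal_get_sorted_title_positions := by
  intro full_text titles _
  unfold Spec_get_sorted_title_positions get_sorted_title_positions get_sorted_title_positions_alt
  simp only
  rw [PySem.List.foldl_append_ite (fun t => PySem.Str.find full_text t ≠ -1)
    (fun t => (PySem.Str.find full_text t, t)) titles []]
  set cand := (titles.filter (fun t => decide (PySem.Str.find full_text t ≠ -1))).map
    (fun t => (PySem.Str.find full_text t, t)) with hcand
  rw [pvDedup_foldl_eq]
  rw [pvDedupGo_eq_select _ (PySem.List.sorted_pairwise _ _) (-100)]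
  have hpos : ∀ pt ∈ PySem.List.sorted ([] ++ cand) (fun x => x.1) false, (decide (pt.1 > -100 + 10)) = true := by
    intro pt hpt
    have hmem : pt ∈ cand := by
      have := (PySem.List.mem_sorted ([] ++ cand) (fun x => x.1) false pt).mp hpt
      simpa using this
    rw [hcand] at hmem
    obtain ⟨t, ht, hpt'⟩ := List.mem_map.mp hmem
    have htf : PySem.Str.find full_text t ≠ -1 := by
      have := List.of_mem_filter ht
      simpa using this
    have h0 : 0 ≤ PySem.Str.find full_text t :=
      (PySem.Str.find_nonneg_iff _ _).mpr ((PySem.Str.find_ne_neg_one_iff _ _).mp htf)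
    have : pt.1 = PySem.Str.find full_text t := by rw [← hpt']
    simp only [decide_eq_true_eq]
    omega
  rw [List.filter_eq_self.mpr hpos]
  rw [pvSelect_sorted, pvCandidates_eq, ← hcand, pvSelectLoop_eq_select]
  simp only [List.nil_append]
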